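-- pv_equiv track=rewrite | github.com/rubenvannieuwpoort/python_fractions | fractions.py | frac_digits
-- ===== SOURCE A (Python) =====
-- def frac_digits(c, d, base):
-- 	digit_list = []
-- 	c = c % d
-- 	numerators = {}
-- 	period = 0
-- 	while True:
-- 		if c in numerators:
-- 			return digit_list, period - numerators[c]
-- 		numerators[c] = period
-- 		c *= base
-- 		quotient = c // d
-- 		digit_list.append(quotient)
-- 		c -= quotient * d
-- 		period += 1
-- ===== SOURCE B (Python) =====
-- def frac_digits(c, d, base):
--     # Floyd cycle detection on the remainder map r -> r*base % d, O(1) extra space: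
--     # the tortoise/hare meeting point lies on the cycle; walk once around it for the
--     # period lam, locate the cycle start mu with two pointers lam apart, then replay
--     # mu+lam steps emitting the digits.
--     def step(r):
--         return r * base % d
--     r0 = c % d
--     tortoise = step(r0)
--     hare = step(step(r0))
--     while tortoise != hare:
--         tortoise = step(tortoise)
--         hare = step(step(hare))
--     lam = 1
--     u = step(tortoise)
--     while u != tortoise:
--         u = step(u)
--         lam += 1
--     a = r0
--     b = r0
--     for _ in range(lam):
--         b = step(b)
--     mu = 0
--     while a != b:
--         a = step(a)
--         b = step(b)
--         mu += 1
--     digits = []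
--     r = r0
--     for _ in range(mu + lam):
--         digits.append(r * base // d)
--         r = step(r)
--     return digits, lam
-- ===== Notes on version B (the rewrite author's own statement) =====
-- stated objective: alternative
-- what changed: Replaces A's hash-map first-repeat detection with Floyd's tortoise-and-hare cycle detection in O(1) extra space: find a meeting point on the cycle, walk once around it for the period lam, locate the cycle start mu with two pointers lam apart, then replay mu+lam steps to emit the digits.
import Mathlib
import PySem

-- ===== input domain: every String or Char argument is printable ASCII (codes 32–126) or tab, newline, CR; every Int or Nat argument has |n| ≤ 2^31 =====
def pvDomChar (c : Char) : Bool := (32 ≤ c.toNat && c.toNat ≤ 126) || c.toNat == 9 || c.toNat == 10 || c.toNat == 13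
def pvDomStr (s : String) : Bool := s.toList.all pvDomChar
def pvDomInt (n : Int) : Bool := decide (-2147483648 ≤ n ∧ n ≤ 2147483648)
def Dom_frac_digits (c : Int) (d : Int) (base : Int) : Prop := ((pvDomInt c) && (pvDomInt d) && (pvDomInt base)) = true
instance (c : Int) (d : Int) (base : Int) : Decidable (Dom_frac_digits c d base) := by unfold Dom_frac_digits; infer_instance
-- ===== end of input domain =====

-- B replaces A's hash-map first-repeat detection by a storage-free cycle-structure
-- algorithm: jump |d| steps into the cycle, measure the period, locate the cycle start
-- with two pointers, then replay the digits (objective: alternative).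

-- ===== PORT A =====
-- The while-loop returns after at most |d|+1 membership checks (the remainders live in
-- a set of |d| values and one is inserted per pass), so fuel d.natAbs+1 is a totality
-- guard only; the proof shows it is never exhausted.
def fracA_loop (d base : Int) : Nat → List Int → Int → PySem.Dict Int Int → Int → List Int × Int
  | 0, _, _, _, _ => ([], 0)
  | fuel + 1, digit_list, c, numerators, period =>
    match numerators.get? c with
    | some v => (digit_list, period - v)
    | none =>
      let numerators' := numerators.insert c period
      let c' := c * base
      let quotient := PySem.Int.floordiv c' d
      let digit_list' := digit_list ++ [quotient]
      let c'' := c' - quotient * d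
      fracA_loop d base fuel digit_list' c'' numerators' (period + 1)

def frac_digits (c : Int) (d : Int) (base : Int) : List Int × Int :=
  fracA_loop d base (d.natAbs + 1) [] (PySem.Int.mod c d) PySem.Dict.empty 0

-- ===== PORT B =====
def fracB_step (d base r : Int) : Int := PySem.Int.mod (r * base) d

-- 'while tortoise != hare: tortoise = step(tortoise); hare = step(step(hare))';
-- the loops of B stop within |d| steps of their start (the first tortoise/hare meeting
-- index, the period and the tail length are all at most |d|), so fuel d.natAbs is a
-- totality guard only; the proof shows it is never exhausted.
def fracB_meetLoop (d base : Int) : Nat → Int → Int → Int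
  | 0, tortoise, _ => tortoise
  | fuel + 1, tortoise, hare =>
    if tortoise = hare then tortoise
    else fracB_meetLoop d base fuel (fracB_step d base tortoise) (fracB_step d base (fracB_step d base hare))

-- 'for _ in range(n): r = step(r)'
def fracB_iter (d base : Int) : Nat → Int → Int
  | 0, r => r
  | n + 1, r => fracB_iter d base n (fracB_step d base r)

-- 'while u != t: u = step(u); lam += 1'
def fracB_lamLoop (d base t : Int) : Nat → Int → Nat → Nat
  | 0, _, lam => lam
  | fuel + 1, u, lam => if u = t then lam else fracB_lamLoop d base t fuel (fracB_step d base u) (lam + 1)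

-- 'while a != b: a = step(a); b = step(b); mu += 1'
def fracB_muLoop (d base : Int) : Nat → Int → Int → Nat → Nat
  | 0, _, _, mu => mu
  | fuel + 1, a, b, mu => if a = b then mu else fracB_muLoop d base fuel (fracB_step d base a) (fracB_step d base b) (mu + 1)

-- 'for _ in range(n): digits.append(r*base//d); r = step(r)'
def fracB_replay (d base : Int) : Nat → Int → List Int → List Int
  | 0, _, digits => digits
  | n + 1, r, digits => fracB_replay d base n (fracB_step d base r) (digits ++ [PySem.Int.floordiv (r * base) d])

def frac_digits_alt (c : Int) (d : Int) (base : Int) : List Int × Int :=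
  let r0 := PySem.Int.mod c d
  let tortoise := fracB_meetLoop d base d.natAbs (fracB_step d base r0) (fracB_step d base (fracB_step d base r0))
  let lam := fracB_lamLoop d base tortoise d.natAbs (fracB_step d base tortoise) 1
  let b := fracB_iter d base lam r0
  let mu := fracB_muLoop d base d.natAbs r0 b 0
  (fracB_replay d base (mu + lam) r0 [], (lam : Int))

-- ===== PRECONDITION & SPEC =====
-- d = 0 makes the Python (both A and B) raise ZeroDivisionError at 'c % d'.
def Pre_frac_digits (c : Int) (d : Int) (base : Int) : Prop := d ≠ 0
instance (c : Int) (d : Int) (base : Int) : Decidable (Pre_frac_digits c d base) := by unfold Pre_frac_digits; infer_instance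
def pvWitness_frac_digits : Int × Int × Int := (1, 7, 10)

def Spec_frac_digits (c : Int) (d : Int) (base : Int) (out : List Int × Int) : Prop := out = frac_digits_alt c d base
instance (c : Int) (d : Int) (base : Int) (out : List Int × Int) : Decidable (Spec_frac_digits c d base out) := by unfold Spec_frac_digits; infer_instance

-- ===== CLAIM (what is proved, stated in full; the proofs are below) =====
def Claim_equal_frac_digits : Prop := ∀ (c : Int) (d : Int) (base : Int), Dom_frac_digits c d base → Pre_frac_digits c d base → Spec_frac_digits c d base (frac_digits c d base)

-- ===== LEMMAS AND PROOFS =====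

-- fracB_iter is iteration of the step map.
lemma fracB_iter_eq (d base : Int) : ∀ (n : Nat) (r : Int),
    fracB_iter d base n r = (fracB_step d base)^[n] r := by
  intro n
  induction n with
  | zero => intro r; simp [fracB_iter]
  | succ n ih => intro r; rw [fracB_iter, ih, Function.iterate_succ_apply]

-- every iterate starting from a remainder of d lies in a set of d.natAbs values
lemma pvOrbit_mem (d base a : Int) (hd : d ≠ 0) (n : Nat) :
    (fracB_step d base)^[n] (PySem.Int.mod a d) ∈
      (if 0 < d then Finset.Ico (0 : Int) d else Finset.Ioc d 0) := by
  have key : ∀ x : Int, PySem.Int.mod x d ∈ (if 0 < d then Finset.Ico (0 : Int) d else Finset.Ioc d 0) := by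
    intro x
    split_ifs with h
    · simp only [Finset.mem_Ico]
      exact ⟨PySem.Int.mod_nonneg x h, PySem.Int.mod_lt x h⟩
    · have hneg : d < 0 := by omega
      have := PySem.Int.mod_neg_bounds x hneg
      simp only [Finset.mem_Ioc]
      omega
  cases n with
  | zero => simpa using key a
  | succ n =>
    rw [Function.iterate_succ_apply']
    exact key _

-- pigeonhole: within the first |d|+1 iterates some remainder repeats
lemma pvPigeon (d base a : Int) (hd : d ≠ 0) :
    ∃ n, n ≤ d.natAbs ∧ ∃ m, m < n ∧
      (fracB_step d base)^[m] (PySem.Int.mod a d) = (fracB_step d base)^[n] (PySem.Int.mod a d) := by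
  set T := (if 0 < d then Finset.Ico (0 : Int) d else Finset.Ioc d 0) with hT
  have hcard : T.card = d.natAbs := by
    rw [hT]; split_ifs with h
    · rw [Int.card_Ico]; omega
    · rw [Int.card_Ioc]; omega
  have hlt : T.card < (Finset.range (d.natAbs + 1)).card := by
    rw [hcard, Finset.card_range]; omega
  have hmaps : Set.MapsTo (fun n => (fracB_step d base)^[n] (PySem.Int.mod a d))
      ↑(Finset.range (d.natAbs + 1)) ↑T := by
    intro n _; exact pvOrbit_mem d base a hd n
  obtain ⟨x, hx, y, hy, hxy, hexy⟩ := Finset.exists_ne_map_eq_of_card_lt_of_maps_to hlt hmaps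
  simp only [Finset.mem_range] at hx hy
  rcases Nat.lt_or_ge x y with h | h
  · exact ⟨y, by omega, x, h, hexy⟩
  · have h' : y < x := by omega
    exact ⟨x, by omega, y, h', hexy.symm⟩

-- once the orbit has closed (F^[j] r0 = F^[k] r0), it is (k-j)-periodic from index j on
lemma pvPeriodic (F : Int → Int) (r0 : Int) (j k : Nat) (hjk : j < k)
    (he : F^[j] r0 = F^[k] r0) :
    ∀ i, j ≤ i → F^[i + (k - j)] r0 = F^[i] r0 := by
  have base : ∀ e : Nat, F^[j + e + (k - j)] r0 = F^[j + e] r0 := by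
    intro e
    induction e with
    | zero =>
      have h : j + 0 + (k - j) = k := by omega
      rw [h]; simpa using he.symm
    | succ e ih =>
      have h1 : j + (e + 1) + (k - j) = (j + e + (k - j)) + 1 := by omega
      have h2 : j + (e + 1) = (j + e) + 1 := by omega
      rw [h1, h2, Function.iterate_succ_apply', Function.iterate_succ_apply', ih]
  intro i hi
  have h : i = j + (i - j) := by omega
  rw [h]; exact base (i - j)

lemma pvPeriodicMul (F : Int → Int) (r0 : Int) (j k : Nat) (hjk : j < k)
    (he : F^[j] r0 = F^[k] r0) :
    ∀ (q : Nat) (i : Nat), j ≤ i → F^[i + q * (k - j)] r0 = F^[i] r0 := by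
  intro q
  induction q with
  | zero => intro i _; simp
  | succ q ih =>
    intro i hi
    have h : i + (q + 1) * (k - j) = (i + q * (k - j)) + (k - j) := by ring
    rw [h, pvPeriodic F r0 j k hjk he (i + q * (k - j)) (by omega), ih i hi]

-- reduction of any index ≥ j into the window [j, k)
lemma pvReduce (F : Int → Int) (r0 : Int) (j k : Nat) (hjk : j < k)
    (he : F^[j] r0 = F^[k] r0) :
    ∀ i, j ≤ i → F^[i] r0 = F^[j + (i - j) % (k - j)] r0 := by
  intro i hi
  have hlam : 0 < k - j := by omega
  have hdm : (i - j) / (k - j) * (k - j) + (i - j) % (k - j) = i - j := Nat.div_add_mod' _ _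
  have h : i = (j + (i - j) % (k - j)) + ((i - j) / (k - j)) * (k - j) := by omega
  conv_lhs => rw [h]
  exact pvPeriodicMul F r0 j k hjk he ((i - j) / (k - j)) (j + (i - j) % (k - j)) (by omega)

-- Floyd's loop: tortoise at F^[cnt], hare at F^[2*cnt]; it stops at the least
-- meeting index Q and returns the meeting value F^[Q] r0
lemma fracB_meetLoop_eq (d base r0 : Int) (Q : Nat) (hQ1 : 1 ≤ Q)
    (hQ : (fracB_step d base)^[Q] r0 = (fracB_step d base)^[2 * Q] r0)
    (hmin : ∀ q, 1 ≤ q → q < Q → (fracB_step d base)^[q] r0 ≠ (fracB_step d base)^[2 * q] r0) :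
    ∀ (fuel cnt : Nat), 1 ≤ cnt → cnt ≤ Q → Q ≤ cnt + fuel →
      fracB_meetLoop d base fuel ((fracB_step d base)^[cnt] r0) ((fracB_step d base)^[2 * cnt] r0)
        = (fracB_step d base)^[Q] r0 := by
  intro fuel
  induction fuel with
  | zero =>
    intro cnt h1 h2 h3
    have h : cnt = Q := by omega
    subst h; simp [fracB_meetLoop]
  | succ fuel ih =>
    intro cnt h1 h2 h3
    by_cases hc : cnt = Q
    · subst hc
      simp [fracB_meetLoop, hQ.symm]
    · have hne : (fracB_step d base)^[cnt] r0 ≠ (fracB_step d base)^[2 * cnt] r0 := hmin cnt h1 (by omega)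
      have hs1 : fracB_step d base ((fracB_step d base)^[cnt] r0) = (fracB_step d base)^[cnt + 1] r0 :=
        (Function.iterate_succ_apply' _ _ _).symm
      have hs2 : fracB_step d base (fracB_step d base ((fracB_step d base)^[2 * cnt] r0)) = (fracB_step d base)^[2 * (cnt + 1)] r0 := by
        rw [← Function.iterate_succ_apply' (fracB_step d base) (2 * cnt) r0,
          ← Function.iterate_succ_apply' (fracB_step d base) (2 * cnt + 1) r0]
        have h : (2 * cnt + 1).succ = 2 * (cnt + 1) := by omega
        rw [h]
      rw [fracB_meetLoop, if_neg hne, hs1, hs2]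
      exact ih (cnt + 1) (by omega) (by omega) (by omega)

-- the lam-loop finds the least positive L with F^[L] t = t
lemma fracB_lamLoop_eq (d base t : Int) (L : Nat) (hL1 : 1 ≤ L)
    (hLt : (fracB_step d base)^[L] t = t)
    (hmin : ∀ p, 1 ≤ p → p < L → (fracB_step d base)^[p] t ≠ t) :
    ∀ (fuel cnt : Nat), 1 ≤ cnt → cnt ≤ L → L ≤ cnt + fuel →
      fracB_lamLoop d base t fuel ((fracB_step d base)^[cnt] t) cnt = L := by
  intro fuel
  induction fuel with
  | zero =>
    intro cnt h1 h2 h3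
    have h : cnt = L := by omega
    subst h; simp [fracB_lamLoop]
  | succ fuel ih =>
    intro cnt h1 h2 h3
    by_cases hc : cnt = L
    · subst hc
      simp [fracB_lamLoop, hLt]
    · have hne : (fracB_step d base)^[cnt] t ≠ t := hmin cnt h1 (by omega)
      have hsucc : fracB_step d base ((fracB_step d base)^[cnt] t) = (fracB_step d base)^[cnt + 1] t :=
        (Function.iterate_succ_apply' _ _ _).symm
      rw [fracB_lamLoop, if_neg hne, hsucc]
      exact ih (cnt + 1) (by omega) (by omega) (by omega)

-- the mu-loop finds the least i with F^[i] r0 = F^[i+L] r0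
lemma fracB_muLoop_eq (d base r0 : Int) (L J : Nat)
    (hJ : (fracB_step d base)^[J] r0 = (fracB_step d base)^[J + L] r0)
    (hmin : ∀ i, i < J → (fracB_step d base)^[i] r0 ≠ (fracB_step d base)^[i + L] r0) :
    ∀ (fuel cnt : Nat), cnt ≤ J → J ≤ cnt + fuel →
      fracB_muLoop d base fuel ((fracB_step d base)^[cnt] r0) ((fracB_step d base)^[cnt + L] r0) cnt = J := by
  intro fuel
  induction fuel with
  | zero =>
    intro cnt h1 h2
    have h : cnt = J := by omega
    subst h; simp [fracB_muLoop]
  | succ fuel ih =>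
    intro cnt h1 h2
    by_cases hc : cnt = J
    · subst hc
      simp [fracB_muLoop, hJ]
    · have hne := hmin cnt (by omega)
      have hs1 : fracB_step d base ((fracB_step d base)^[cnt] r0) = (fracB_step d base)^[cnt + 1] r0 :=
        (Function.iterate_succ_apply' _ _ _).symm
      have hs2 : fracB_step d base ((fracB_step d base)^[cnt + L] r0) = (fracB_step d base)^[(cnt + 1) + L] r0 := by
        rw [← Function.iterate_succ_apply' (fracB_step d base) (cnt + L) r0]
        congr 1
        omega
      rw [fracB_muLoop, if_neg hne, hs1, hs2]
      exact ih (cnt + 1) (by omega) (by omega)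

-- replay emits the digits of the orbit
lemma fracB_replay_eq (d base r0 : Int) : ∀ (n m : Nat) (acc : List Int),
    fracB_replay d base n ((fracB_step d base)^[m] r0) acc
      = acc ++ (List.range n).map (fun i => PySem.Int.floordiv ((fracB_step d base)^[m + i] r0 * base) d) := by
  intro n
  induction n with
  | zero => intro m acc; simp [fracB_replay]
  | succ n ih =>
    intro m acc
    have hsucc : fracB_step d base ((fracB_step d base)^[m] r0) = (fracB_step d base)^[m + 1] r0 :=
      (Function.iterate_succ_apply' _ _ _).symm
    rw [fracB_replay, hsucc, ih (m + 1)]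
    rw [List.range_succ_eq_map]
    simp only [List.map_cons, List.map_map, List.append_assoc, List.singleton_append, Nat.add_zero]
    congr 1
    simp only [List.cons.injEq, true_and]
    apply List.map_congr_left
    intro i _
    have h : m + 1 + i = m + Nat.succ i := by omega
    simp only [Function.comp_apply, h]

-- A's loop, run on the orbit with the dict holding first-occurrence indices, stops at
-- the first repeated remainder (index k, first seen at index j)
lemma fracA_loop_eq (d base r0 : Int) (k j : Nat)
    (hjk : j < k)
    (hsj : (fracB_step d base)^[j] r0 = (fracB_step d base)^[k] r0)
    (hjmin : ∀ m, m < j → (fracB_step d base)^[m] r0 ≠ (fracB_step d base)^[k] r0)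
    (hdist : ∀ m n, m < n → n < k → (fracB_step d base)^[m] r0 ≠ (fracB_step d base)^[n] r0) :
    ∀ (fuel n : Nat) (dict : PySem.Dict Int Int),
      n ≤ k → k < n + fuel →
      (∀ x, dict.get? x = (PySem.List.index? ((List.range n).map fun i => (fracB_step d base)^[i] r0) x).map (fun i => (i : Int))) →
      fracA_loop d base fuel ((List.range n).map fun i => PySem.Int.floordiv ((fracB_step d base)^[i] r0 * base) d)
          ((fracB_step d base)^[n] r0) dict (n : Int)
        = ((List.range k).map fun i => PySem.Int.floordiv ((fracB_step d base)^[i] r0 * base) d, (k : Int) - (j : Int)) := by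
  intro fuel
  induction fuel with
  | zero => intro n dict h1 h2 _; omega
  | succ fuel ih =>
    intro n dict h1 h2 hdict
    by_cases hn : n = k
    · subst hn
      have hidx : List.idxOf? ((fracB_step d base)^[n] r0) ((List.range n).map fun i => (fracB_step d base)^[i] r0) = some j := by
        rw [List.idxOf?_eq_some_iff]
        refine ⟨by simpa using hjk, ?_, ?_⟩
        · simp only [List.getElem_map, List.getElem_range]
          exact hsj
        · intro m hm
          simp only [List.getElem_map, List.getElem_range]
          exact hjmin m hm
      have hd' : dict.get? ((fracB_step d base)^[n] r0) = some (j : Int) := by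
        rw [hdict]
        have : PySem.List.index? ((List.range n).map fun i => (fracB_step d base)^[i] r0) ((fracB_step d base)^[n] r0) = some j := by
          simpa using hidx
        rw [this]; rfl
      simp [fracA_loop, hd']
    · have hnk : n < k := by omega
      have hnotmem : (fracB_step d base)^[n] r0 ∉ ((List.range n).map fun i => (fracB_step d base)^[i] r0) := by
        intro hmem
        simp only [List.mem_map, List.mem_range] at hmem
        obtain ⟨i, hi, he⟩ := hmem
        exact hdist i n hi hnk he
      have hnone : PySem.List.index? ((List.range n).map fun i => (fracB_step d base)^[i] r0) ((fracB_step d base)^[n] r0) = none :=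
        (PySem.List.index?_eq_none_iff _ _).mpr hnotmem
      have hd' : dict.get? ((fracB_step d base)^[n] r0) = none := by
        rw [hdict, hnone]; rfl
      simp only [fracA_loop, hd']
      have hmod : (fracB_step d base)^[n] r0 * base -
          PySem.Int.floordiv ((fracB_step d base)^[n] r0 * base) d * d = (fracB_step d base)^[n + 1] r0 := by
        rw [Function.iterate_succ_apply']
        have h := PySem.Int.floordiv_mul_add_mod ((fracB_step d base)^[n] r0 * base) d
        simp only [fracB_step]
        linarith
      have hdig : ((List.range n).map fun i => PySem.Int.floordiv ((fracB_step d base)^[i] r0 * base) d)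
          ++ [PySem.Int.floordiv ((fracB_step d base)^[n] r0 * base) d]
          = (List.range (n + 1)).map fun i => PySem.Int.floordiv ((fracB_step d base)^[i] r0 * base) d := by
        rw [List.range_succ, List.map_append]; rfl
      have hper : (n : Int) + 1 = ((n + 1 : Nat) : Int) := by push_cast; ring
      rw [hmod, hdig, hper]
      apply ih (n + 1) _ (by omega) (by omega)
      intro x
      rw [PySem.Dict.get?_insert]
      by_cases hx : x = (fracB_step d base)^[n] r0
      · subst hx
        have hidx2 : PySem.List.index? (((List.range n).map fun i => (fracB_step d base)^[i] r0) ++ [(fracB_step d base)^[n] r0]) ((fracB_step d base)^[n] r0) = some n := by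
          rw [PySem.List.index?_append_singleton_self _ _ hnotmem]
          simp
        rw [if_pos rfl, List.range_succ, List.map_append]
        simp only [List.map_cons, List.map_nil, hidx2]
        simp
      · rw [if_neg hx, hdict x, List.range_succ, List.map_append, List.map_cons, List.map_nil]
        by_cases hxm : x ∈ ((List.range n).map fun i => (fracB_step d base)^[i] r0)
        · rw [PySem.List.index?_append_of_mem _ hxm]
        · have h1 : PySem.List.index? ((List.range n).map fun i => (fracB_step d base)^[i] r0) x = none :=
            (PySem.List.index?_eq_none_iff _ _).mpr hxm
          have h2 : PySem.List.index? (((List.range n).map fun i => (fracB_step d base)^[i] r0) ++ [(fracB_step d base)^[n] r0]) x = none := by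
            refine (PySem.List.index?_eq_none_iff _ _).mpr ?_
            intro hmem
            rcases List.mem_append.mp hmem with hm | hm
            · exact hxm hm
            · exact hx (List.mem_singleton.mp hm)
          rw [h1, h2]

-- ===== VERDICT (by name: the statement is the Claim_ definition above) =====
theorem frac_digits_spec : Claim_equal_frac_digits := by
  intro c d base _ hd
  unfold Spec_frac_digits frac_digits
  simp only [frac_digits_alt]
  have hN0 : 0 < d.natAbs := Int.natAbs_pos.mpr hd
  set N := d.natAbs with hN
  set r0 := PySem.Int.mod c d with hr0
  -- first repeat index k and its earlier twin j
  obtain ⟨n0, hn0, m0, hm0, he0⟩ := pvPigeon d base c hd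
  have hex : ∃ n, ∃ m, m < n ∧ (fracB_step d base)^[m] r0 = (fracB_step d base)^[n] r0 :=
    ⟨n0, m0, hm0, he0⟩
  haveI : DecidablePred fun n => ∃ m, m < n ∧ (fracB_step d base)^[m] r0 = (fracB_step d base)^[n] r0 := fun n =>
    decidable_of_iff (∃ m ∈ Finset.range n, (fracB_step d base)^[m] r0 = (fracB_step d base)^[n] r0) (by simp)
  set k := Nat.find hex with hk
  have hkspec : ∃ m, m < k ∧ (fracB_step d base)^[m] r0 = (fracB_step d base)^[k] r0 := Nat.find_spec hex
  have hkmin : ∀ n, n < k → ¬ ∃ m, m < n ∧ (fracB_step d base)^[m] r0 = (fracB_step d base)^[n] r0 :=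
    fun n h => Nat.find_min hex h
  have hkN : k ≤ N := le_trans (Nat.find_min' hex ⟨m0, hm0, he0⟩) hn0
  set j := Nat.find hkspec with hj
  obtain ⟨hjk, hsj⟩ := Nat.find_spec hkspec
  rw [← hj] at hjk hsj
  have hjmin : ∀ m, m < j → (fracB_step d base)^[m] r0 ≠ (fracB_step d base)^[k] r0 := by
    intro m hm he
    exact Nat.find_min hkspec hm ⟨by omega, he⟩
  have hdist : ∀ m n, m < n → n < k → (fracB_step d base)^[m] r0 ≠ (fracB_step d base)^[n] r0 :=
    fun m n h1 h2 he => hkmin n h2 ⟨m, h1, he⟩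
  set lam := k - j with hlam
  have hlam1 : 1 ≤ lam := by omega
  have hper : ∀ i, j ≤ i → (fracB_step d base)^[i + lam] r0 = (fracB_step d base)^[i] r0 :=
    pvPeriodic (fracB_step d base) r0 j k hjk hsj
  -- phase 1: Floyd's meeting point is F^[Q] r0, Q the least q >= 1 with F^[q] = F^[2q];
  -- a multiple of lam in [j, k] meets, so Q exists, Q <= N, and (key) j <= Q
  set q0 := lam * (j / lam + 1) with hq0def
  have hq0 : q0 = lam * (j / lam) + lam := by rw [hq0def]; ring
  have hdm : lam * (j / lam) + j % lam = j := Nat.div_add_mod j lam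
  have hmlt : j % lam < lam := Nat.mod_lt _ (by omega)
  have hjq0 : j ≤ q0 := by omega
  have hq0meet : (fracB_step d base)^[q0] r0 = (fracB_step d base)^[2 * q0] r0 := by
    have h := pvPeriodicMul (fracB_step d base) r0 j k hjk hsj (j / lam + 1) q0 hjq0
    have hc : (j / lam + 1) * (k - j) = lam * (j / lam + 1) := by rw [hlam]; ring
    have h2 : q0 + (j / lam + 1) * (k - j) = 2 * q0 := by omega
    rw [h2] at h
    exact h.symm
  have hexQ : ∃ q, 0 < q ∧ (fracB_step d base)^[q] r0 = (fracB_step d base)^[2 * q] r0 :=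
    ⟨q0, by omega, hq0meet⟩
  set Q := Nat.find hexQ with hQdef
  obtain ⟨hQ1, hQmeet⟩ := Nat.find_spec hexQ
  rw [← hQdef] at hQ1 hQmeet
  have hQmin : ∀ q, 1 ≤ q → q < Q → (fracB_step d base)^[q] r0 ≠ (fracB_step d base)^[2 * q] r0 := by
    intro q h1 h2 he
    exact Nat.find_min hexQ h2 ⟨by omega, he⟩
  have hQN : Q ≤ N := le_trans (Nat.find_min' hexQ ⟨by omega, hq0meet⟩) (by omega)
  have hQj : j ≤ Q := by
    by_contra hlt
    push_neg at hlt
    have h2Q : k ≤ 2 * Q := by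
      by_contra h
      push_neg at h
      exact hdist Q (2 * Q) (by omega) (by omega) hQmeet
    have hred := pvReduce (fracB_step d base) r0 j k hjk hsj (2 * Q) (by omega)
    have hidx : j + (2 * Q - j) % (k - j) < k := by
      have := Nat.mod_lt (2 * Q - j) (show 0 < k - j by omega)
      omega
    exact hdist Q (j + (2 * Q - j) % (k - j)) (by omega) hidx (hQmeet.trans hred)
  have hmeet : fracB_meetLoop d base N (fracB_step d base r0) (fracB_step d base (fracB_step d base r0))
      = (fracB_step d base)^[Q] r0 := by
    have h := fracB_meetLoop_eq d base r0 Q (by omega) hQmeet hQmin N 1 (by omega) (by omega) (by omega)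
    have e1 : (fracB_step d base)^[1] r0 = fracB_step d base r0 := by
      rw [Function.iterate_one]
    have e2 : (fracB_step d base)^[2 * 1] r0 = fracB_step d base (fracB_step d base r0) := by
      show (fracB_step d base)^[2] r0 = _
      rw [Function.iterate_succ_apply', Function.iterate_one]
    rw [e1, e2] at h
    exact h
  -- phase 2: the lam-loop, started at the meeting point, returns lam
  have hLt : (fracB_step d base)^[lam] ((fracB_step d base)^[Q] r0) = (fracB_step d base)^[Q] r0 := by
    rw [← Function.iterate_add_apply, Nat.add_comm]
    exact hper Q (by omega)
  have hLmin : ∀ p, 1 ≤ p → p < lam → (fracB_step d base)^[p] ((fracB_step d base)^[Q] r0) ≠ (fracB_step d base)^[Q] r0 := by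
    intro p hp1 hp2 he
    rw [← Function.iterate_add_apply, Nat.add_comm] at he
    have hred1 := pvReduce (fracB_step d base) r0 j k hjk hsj (Q + p) (by omega)
    have hred2 := pvReduce (fracB_step d base) r0 j k hjk hsj Q (by omega)
    set a := (Q - j) % lam with ha
    set b := (Q + p - j) % lam with hb
    have haL : a < lam := Nat.mod_lt _ (by omega)
    have hbL : b < lam := Nat.mod_lt _ (by omega)
    have heq : (fracB_step d base)^[j + b] r0 = (fracB_step d base)^[j + a] r0 := by
      rw [← hred1, ← hred2]; exact he
    have hab : a = b := by
      by_contra hab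
      rcases Nat.lt_or_ge a b with h | h
      · exact hdist (j + a) (j + b) (by omega) (by omega) heq.symm
      · have h' : b < a := by omega
        exact hdist (j + b) (j + a) (by omega) (by omega) heq
    -- (Q - j) % lam = (Q - j + p) % lam forces lam ∣ p, impossible for 1 ≤ p < lam
    have hx : (Q + p - j) = (Q - j) + p := by omega
    rw [hx] at hb
    have hmodeq : ((Q - j) + p) % lam = ((Q - j) + 0) % lam := by
      rw [Nat.add_zero]; omega
    have hp0 : p % lam = 0 % lam := Nat.ModEq.add_left_cancel' (Q - j) hmodeq
    rw [Nat.zero_mod, Nat.mod_eq_of_lt hp2] at hp0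
    omega
  have hlamloop : fracB_lamLoop d base ((fracB_step d base)^[Q] r0) N
      (fracB_step d base ((fracB_step d base)^[Q] r0)) 1 = lam := by
    have h := fracB_lamLoop_eq d base ((fracB_step d base)^[Q] r0) lam hlam1 hLt hLmin N 1
      (by omega) (by omega) (by omega)
    simpa using h
  -- phase 3: the mu-loop returns j
  have hJ : (fracB_step d base)^[j] r0 = (fracB_step d base)^[j + lam] r0 := by
    rw [hper j (le_refl j)]
  have hJmin : ∀ i, i < j → (fracB_step d base)^[i] r0 ≠ (fracB_step d base)^[i + lam] r0 := by
    intro i hi he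
    exact hdist i (i + lam) (by omega) (by omega) he
  have hmuloop : fracB_muLoop d base N r0 ((fracB_step d base)^[lam] r0) 0 = j := by
    have h := fracB_muLoop_eq d base r0 lam j hJ hJmin N 0 (by omega) (by omega)
    simpa using h
  -- phase 4: replay k = j + lam digits
  have hreplay : fracB_replay d base (j + lam) r0 []
      = (List.range k).map fun i => PySem.Int.floordiv ((fracB_step d base)^[i] r0 * base) d := by
    have h := fracB_replay_eq d base r0 (j + lam) 0 []
    have hjl : j + lam = k := by omega
    simpa [hjl] using h
  -- A's side
  have hA := fracA_loop_eq d base r0 k j hjk hsj hjmin hdist (N + 1) 0 PySem.Dict.empty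
    (by omega) (by omega) (by intro x; simp [PySem.Dict.get?_empty, PySem.List.index?])
  simp only [List.range_zero, List.map_nil, Function.iterate_zero_apply, Nat.cast_zero] at hA
  -- assemble
  rw [hA, hmeet, hlamloop, fracB_iter_eq, hmuloop, hreplay]
  simp only [Prod.mk.injEq, true_and]
  omega
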